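-- pv_equiv track=rewrite | github.com/Udjin79/atlassian-marketplace-scraper | scraper/description_downloader.py | _pick_version
-- ===== SOURCE A (Python) =====
-- from typing import Dict, Optional, Tuple, List
--
-- def _pick_version(versions: List[Dict], wanted: Optional[str] = None) -> Optional[Dict]:
--     """Pick version from list."""
--     if not versions:
--         return None
--     if not wanted:
--         return versions[0]
--     target = wanted.strip().lower()
--     for entry in versions:
--         if (entry.get("name") or "").strip().lower() == target:
--             return entry
--     for entry in versions:
--         if (entry.get("name") or "").strip().lower().startswith(target):
--             return entry
--     return None
-- ===== SOURCE B (Python) =====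
-- from typing import Dict, Optional, List
--
-- def _pick_version(versions: List[Dict], wanted: Optional[str] = None) -> Optional[Dict]:
--     """Pick version from list (single pass: exact match wins, first prefix match kept as fallback)."""
--     if not versions:
--         return None
--     if not wanted:
--         return versions[0]
--     target = wanted.strip().lower()
--     fallback = None
--     for entry in versions:
--         name = (entry.get("name") or "").strip().lower()
--         if name == target:
--             return entry
--         if fallback is None and name.startswith(target):
--             fallback = entry
--     return fallback
-- ===== Notes on version B (the rewrite author's own statement) =====
-- stated objective: alternative
-- what changed: Replaced A's two full scans (exact-match scan, then prefix-match scan) by a single pass that normalizes each name once, returns immediately on an exact match and remembers only the first prefix match as a fallback.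
import Mathlib
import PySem

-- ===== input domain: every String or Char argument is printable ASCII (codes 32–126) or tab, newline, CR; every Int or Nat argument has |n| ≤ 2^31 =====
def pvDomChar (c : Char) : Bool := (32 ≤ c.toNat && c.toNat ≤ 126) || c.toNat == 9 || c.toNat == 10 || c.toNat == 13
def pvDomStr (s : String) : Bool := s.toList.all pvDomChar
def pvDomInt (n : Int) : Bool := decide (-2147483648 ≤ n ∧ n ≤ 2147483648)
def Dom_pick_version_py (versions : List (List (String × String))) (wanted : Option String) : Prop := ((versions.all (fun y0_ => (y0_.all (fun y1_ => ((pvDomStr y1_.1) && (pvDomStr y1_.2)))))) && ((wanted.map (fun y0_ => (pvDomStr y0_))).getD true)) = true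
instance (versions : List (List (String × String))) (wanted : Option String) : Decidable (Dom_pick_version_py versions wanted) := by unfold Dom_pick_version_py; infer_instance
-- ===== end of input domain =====

def pvNorm (e : List (String × String)) : String :=
  PySem.Str.lower (PySem.Str.strip (((PySem.Dict.mk e).get? "name").getD ""))

-- ===== PORT A =====
-- two scans: first the exact-match loop, then the prefix-match loop (each = first match found)
def pick_version_py (versions : List (List (String × String))) (wanted : Option String) : Option (List (String × String)) :=
  if versions = [] then none
  else
    match wanted with
    | none => versions.head?
    | some w =>
      if w = "" then versions.head?
      else
        let target := PySem.Str.lower (PySem.Str.strip w)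
        match versions.find? (fun e => pvNorm e == target) with
        | some e => some e
        | none => versions.find? (fun e => PySem.Str.startswith (pvNorm e) target)

-- single pass: return on exact match, remember first prefix match as fallback
def pvAltLoop (target : String) : List (List (String × String)) → Option (List (String × String)) → Option (List (String × String))
  | [], fb => fb
  | e :: rest, fb =>
    let name := pvNorm e
    if name == target then some e
    else pvAltLoop target rest (if fb.isNone && PySem.Str.startswith name target then some e else fb)

def pick_version_py_alt (versions : List (List (String × String))) (wanted : Option String) : Option (List (String × String)) :=
  if versions = [] then none
  else
    match wanted with
    | none => versions.head?
    | some w =>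
      if w = "" then versions.head?
      else pvAltLoop (PySem.Str.lower (PySem.Str.strip w)) versions none

-- ===== PRECONDITION & SPEC =====
def Spec_pick_version_py (versions : List (List (String × String))) (wanted : Option String) (out : Option (List (String × String))) : Prop := out = pick_version_py_alt versions wanted
instance (versions : List (List (String × String))) (wanted : Option String) (out : Option (List (String × String))) : Decidable (Spec_pick_version_py versions wanted out) := by unfold Spec_pick_version_py; infer_instance

-- ===== CLAIM (what is proved, stated in full; the proofs are below) =====
def Claim_equal_pick_version_py : Prop := ∀ (versions : List (List (String × String))) (wanted : Option String), Dom_pick_version_py versions wanted → Spec_pick_version_py versions wanted (pick_version_py versions wanted)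

-- ===== LEMMAS AND PROOFS =====

lemma pvAltLoop_eq (target : String) (l : List (List (String × String))) (fb : Option (List (String × String))) :
    pvAltLoop target l fb =
      match l.find? (fun e => pvNorm e == target) with
      | some e => some e
      | none => fb.orElse (fun _ => l.find? (fun e => PySem.Str.startswith (pvNorm e) target)) := by
  induction l generalizing fb with
  | nil => cases fb <;> simp [pvAltLoop, Option.orElse]
  | cons e rest ih =>
    simp only [pvAltLoop, List.find?]
    by_cases hx : (pvNorm e == target) = true
    · simp [hx]
    · simp only [hx, Bool.false_eq_true, if_false, ih]
      cases hf : rest.find? (fun e => pvNorm e == target) with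
      | some x => simp
      | none =>
        cases fb with
        | some f => simp [Option.orElse, Option.isNone]
        | none =>
          simp only [PySem.Str.startswith_eq]
          by_cases hp : PySem.Chars.startswith (pvNorm e).toList target.toList = true
          · simp [hp, Option.orElse, Option.isNone]
          · simp [hp, Option.orElse, Option.isNone]

-- ===== VERDICT (by name: the statement is the Claim_ definition above) =====
theorem pick_version_py_spec : Claim_equal_pick_version_py := by
  intro versions wanted _
  unfold Spec_pick_version_py pick_version_py pick_version_py_alt
  by_cases hv : versions = []
  · simp [hv]
  · simp only [hv, if_false]
    cases wanted with
    | none => rfl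
    | some w =>
      by_cases hw : w = ""
      · simp [hw]
      · simp only [hw, if_false, pvAltLoop_eq]
        cases versions.find? (fun e => pvNorm e == PySem.Str.lower (PySem.Str.strip w)) <;>
          simp [Option.orElse]
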